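-- pv_equiv track=rewrite | github.com/kammitama5/Distracting_KATAS | howmanyanimalsarethere.py | CountAnimals
-- ===== SOURCE A (Python) =====
-- def CountAnimals(sentence):
--     arr1 = []
--     arr =  sentence.split(" ")
--     total = 0;
--     total1 = 0;
--     for i in arr:
--      try:
--        int(i)
--        total = total + int(i)
--        arr1.append(total)
--      except:
--        total = 0
--     if len(arr1) == 0:
--       return 0
--     else:
--       for i in arr1:
--         total1 = total1 + i
--       return total1
-- ===== SOURCE B (Python) =====
-- def CountAnimals(sentence):
--     # Run-based re-implementation: parse each token once, group numeric tokens
--     # into maximal runs, add each run's closed-form weighted sum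
--     # (first element counts k times, ..., last once) instead of materialising
--     # the prefix-sum list and summing it in a second pass.
--     def to_int(t):
--         try:
--             return int(t)
--         except ValueError:
--             return None
--
--     def weighted(run):
--         k = len(run)
--         return sum(v * (k - i) for i, v in enumerate(run))
--
--     ans = 0
--     run = []
--     for t in sentence.split(" "):
--         v = to_int(t)
--         if v is None:
--             ans += weighted(run)
--             run = []
--         else:
--             run.append(v)
--     return ans + weighted(run)
-- ===== Notes on version B (the rewrite author's own statement) =====
-- stated objective: alternative
-- what changed: Instead of building the list of running prefix sums and summing it in a second pass, B parses each token once, groups consecutive numeric tokens into maximal runs, and adds each run's closed-form weighted sum (value times distance from the run's end), using O(1) extra state per run and no prefix-sum list.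
import Mathlib
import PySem

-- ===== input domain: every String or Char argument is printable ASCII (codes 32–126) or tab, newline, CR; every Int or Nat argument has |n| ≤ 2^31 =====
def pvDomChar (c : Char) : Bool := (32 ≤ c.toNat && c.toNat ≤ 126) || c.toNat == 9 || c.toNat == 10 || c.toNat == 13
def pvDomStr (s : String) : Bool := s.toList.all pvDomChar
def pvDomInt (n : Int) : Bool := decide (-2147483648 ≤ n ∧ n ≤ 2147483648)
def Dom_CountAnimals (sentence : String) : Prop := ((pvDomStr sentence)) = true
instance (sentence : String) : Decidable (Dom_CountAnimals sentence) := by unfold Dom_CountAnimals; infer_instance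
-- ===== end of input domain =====

-- B groups numeric tokens into maximal runs and adds each run's closed-form
-- weighted sum, instead of A's prefix-sum list summed in a second pass.

-- ===== PORT A =====
def CountAnimals (sentence : String) : Int :=
  let arr := (PySem.Str.split? sentence " ").getD []
  let st := arr.foldl
    (fun (st : List Int × Int) i =>
      match PySem.Int.ofStr? i with
      | some v => (st.1 ++ [st.2 + v], st.2 + v)   -- try succeeds: total += int(i); arr1.append(total)
      | none => (st.1, (0 : Int)))                 -- except: total = 0
    ([], 0)
  if st.1.length = 0 then 0
  else st.1.foldl (fun total1 i => total1 + i) 0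

-- ===== PORT B =====
def pvToInt? (t : String) : Option Int := PySem.Int.ofStr? t

def pvWeighted (run : List Int) : Int :=
  ((PySem.List.enumerate run 0).map (fun p => p.2 * ((run.length : Int) - p.1))).sum

def CountAnimals_alt (sentence : String) : Int :=
  let st := ((PySem.Str.split? sentence " ").getD []).foldl
    (fun (st : Int × List Int) t =>
      match pvToInt? t with
      | none => (st.1 + pvWeighted st.2, [])
      | some v => (st.1, st.2 ++ [v]))
    (0, [])
  st.1 + pvWeighted st.2

-- ===== PRECONDITION & SPEC =====
def Spec_CountAnimals (sentence : String) (out : Int) : Prop := out = CountAnimals_alt sentence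
instance (sentence : String) (out : Int) : Decidable (Spec_CountAnimals sentence out) := by unfold Spec_CountAnimals; infer_instance

-- ===== CLAIM (what is proved, stated in full; the proofs are below) =====
def Claim_equal_CountAnimals : Prop := ∀ (sentence : String), Dom_CountAnimals sentence → Spec_CountAnimals sentence (CountAnimals sentence)

-- ===== LEMMAS AND PROOFS =====

-- shifting every weight up by one adds the run's plain sum
theorem pvWeighted_shift (l : List Int) (s c : Int) :
    ((PySem.List.enumerate l s).map (fun p => p.2 * ((c + 1) - p.1))).sum
      = ((PySem.List.enumerate l s).map (fun p => p.2 * (c - p.1))).sum + l.sum := by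
  have h : ((PySem.List.enumerate l s).map (fun p => p.2 * ((c + 1) - p.1))).sum
      = ((PySem.List.enumerate l s).map (fun p => p.2 * (c - p.1) + p.2)).sum := by
    congr 1
    apply List.map_congr_left
    intro p _
    ring
  rw [h, PySem.List.sum_map_add_int]
  have h2 : (List.map (fun (p : Int × Int) => p.2) (PySem.List.enumerate l s)).sum = l.sum := by
    rw [PySem.List.map_snd_enumerate]
  rw [h2]

theorem pvWeighted_append (l : List Int) (v : Int) :
    pvWeighted (l ++ [v]) = pvWeighted l + l.sum + v := by
  unfold pvWeighted
  rw [PySem.List.enumerate_append, List.map_append, List.sum_append]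
  have hlen : (((l ++ [v]).length : Nat) : Int) = ((l.length : Int)) + 1 := by simp
  have h1 : (List.map (fun p => p.2 * (((l ++ [v]).length : Int) - p.1)) (PySem.List.enumerate l 0)).sum
      = (List.map (fun p => p.2 * ((((l.length : Int)) + 1) - p.1)) (PySem.List.enumerate l 0)).sum := by
    rw [hlen]
  have h3 : (List.map (fun p => p.2 * (((l ++ [v]).length : Int) - p.1)) (PySem.List.enumerate [v] (0 + l.length))).sum = v := by
    simp only [PySem.List.enumerate_cons, PySem.List.enumerate_nil, List.map_cons, List.map_nil,
      List.sum_cons, List.sum_nil, hlen]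
    ring
  rw [h1, h3, pvWeighted_shift l 0 (l.length : Int)]

-- loop invariant: A's (arr1, total) vs B's (ans, run) over the same token list
theorem pv_loop_inv (toks : List String) (arr1 : List Int) (total ans : Int) (run : List Int)
    (h1 : arr1.sum = ans + pvWeighted run) (h2 : total = run.sum) :
    (toks.foldl
      (fun (st : List Int × Int) i =>
        match PySem.Int.ofStr? i with
        | some v => (st.1 ++ [st.2 + v], st.2 + v)
        | none => (st.1, (0 : Int))) (arr1, total)).1.sum
    = (toks.foldl
        (fun (st : Int × List Int) t =>
          match pvToInt? t with
          | none => (st.1 + pvWeighted st.2, [])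
          | some v => (st.1, st.2 ++ [v])) (ans, run)).1
      + pvWeighted (toks.foldl
          (fun (st : Int × List Int) t =>
            match pvToInt? t with
            | none => (st.1 + pvWeighted st.2, [])
            | some v => (st.1, st.2 ++ [v])) (ans, run)).2 := by
  induction toks generalizing arr1 total ans run with
  | nil => simpa using h1
  | cons t ts ih =>
    simp only [List.foldl_cons, pvToInt?]
    cases hv : PySem.Int.ofStr? t with
    | none =>
      exact ih arr1 0 (ans + pvWeighted run) [] (by simpa [pvWeighted] using h1) (by simp)
    | some v =>
      refine ih (arr1 ++ [total + v]) (total + v) ans (run ++ [v]) ?_ ?_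
      · rw [List.sum_append, pvWeighted_append]
        simp only [List.sum_cons, List.sum_nil]
        omega
      · simp [h2]

theorem pv_foldl_sum (l : List Int) : l.foldl (fun total1 i => total1 + i) 0 = l.sum := by
  simpa using PySem.List.foldl_add l (fun x => x) 0

-- ===== VERDICT (by name: the statement is the Claim_ definition above) =====
theorem CountAnimals_spec : Claim_equal_CountAnimals := by
  intro sentence _
  unfold Spec_CountAnimals CountAnimals CountAnimals_alt
  have key := pv_loop_inv ((PySem.Str.split? sentence " ").getD []) [] 0 0 []
    (by simp [pvWeighted]) (by simp)
  simp only at key ⊢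
  split
  · next h =>
    rw [List.length_eq_zero_iff] at h
    rw [h] at key
    simpa using key
  · next h =>
    rw [pv_foldl_sum]
    exact key
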